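-- pv_equiv track=rewrite | github.com/DataWizardForSkyrim/masterCompressorBETA | __init__.py | newdictfunc
-- ===== SOURCE A (Python) =====
-- def multimodefndr(modestring, modehopeful, listvar):
-- 	modecnt = 0
-- 	for x in listvar:
-- 		if modestring in x:
-- 			pass
-- 		elif modehopeful in x:
-- 			modecnt += 1
-- 	return modecnt
--
-- def newdictfunc(keynumv, keylistv, modvar, cleanblockhst):
-- 	newdict = {}
-- 	while keynumv > 0:  # dict iteration for finding alt mode hopefuls
-- 		keynumv -= 1
-- 		mhopeful = keylistv[keynumv]
-- 		modecnt = multimodefndr(modvar, mhopeful, cleanblockhst)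
-- 		newdict[mhopeful] = modecnt
-- 		# NOTE:: $control$ -04/23/21- ##$: this logic doesnt work due to main.py's function flow
-- 		# $$$:: set up a boolean for if altmode can be found??
-- #		if modecnt > 0:
-- #			newdict[mhopeful] = modecnt
-- #		else:
-- #			pass
-- 	return newdict
-- ===== SOURCE B (Python) =====
-- def newdictfunc(keynumv, keylistv, modvar, cleanblockhst):
--     newdict = {}
--     for i in range(keynumv - 1, -1, -1):
--         newdict[keylistv[i]] = 0
--     for x in cleanblockhst:
--         if modvar in x:
--             continue
--         for k in newdict:
--             if k in x:
--                 newdict[k] += 1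
--     return newdict
-- ===== Notes on version B (the rewrite author's own statement) =====
-- stated objective: alternative
-- what changed: Inverted the loop nesting: instead of rescanning cleanblockhst once per key (A), B first builds a zero-initialized count table over the keys and then makes a single pass over cleanblockhst, skipping modvar-containing elements and incrementing every table key that is a substring of the element.
import Mathlib
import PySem

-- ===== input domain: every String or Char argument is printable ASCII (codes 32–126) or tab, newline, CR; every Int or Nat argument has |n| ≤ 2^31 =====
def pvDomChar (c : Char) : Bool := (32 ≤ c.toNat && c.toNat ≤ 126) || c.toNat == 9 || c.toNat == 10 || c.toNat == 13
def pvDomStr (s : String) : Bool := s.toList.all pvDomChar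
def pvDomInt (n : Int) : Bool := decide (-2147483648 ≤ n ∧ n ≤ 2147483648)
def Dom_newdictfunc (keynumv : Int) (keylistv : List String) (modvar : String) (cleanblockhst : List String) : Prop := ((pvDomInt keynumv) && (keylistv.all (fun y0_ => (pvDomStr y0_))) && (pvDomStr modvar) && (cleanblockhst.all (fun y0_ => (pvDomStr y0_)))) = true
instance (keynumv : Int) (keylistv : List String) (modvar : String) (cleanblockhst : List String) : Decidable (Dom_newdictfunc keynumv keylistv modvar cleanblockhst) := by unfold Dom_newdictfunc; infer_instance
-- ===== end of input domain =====

-- B inverts the loop nesting of A (one pass over the data with a running count table instead of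
-- one rescan of the data per key); same asymptotic cost, different traversal (objective: alternative).

-- ===== PORT A =====
def multimodefndr (modestring : String) (modehopeful : String) (listvar : List String) : Int :=
  listvar.foldl
    (fun modecnt x =>
      if PySem.Str.isIn modestring x then modecnt
      else if PySem.Str.isIn modehopeful x then modecnt + 1
      else modecnt) 0

def newdictfuncLoop (keylistv : List String) (modvar : String) (cleanblockhst : List String)
    (keynumv : Int) (newdict : PySem.Dict String Int) : PySem.Dict String Int :=
  if 0 < keynumv then
    match PySem.List.pyGet? keylistv (keynumv - 1) with
    | none => newdict  -- keylistv[keynumv-1] raises IndexError in Python; excluded by Pre_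
    | some mhopeful =>
        newdictfuncLoop keylistv modvar cleanblockhst (keynumv - 1)
          (newdict.insert mhopeful (multimodefndr modvar mhopeful cleanblockhst))
  else newdict
termination_by keynumv.toNat
decreasing_by omega

def newdictfunc (keynumv : Int) (keylistv : List String) (modvar : String) (cleanblockhst : List String) : List (String × Int) :=
  (newdictfuncLoop keylistv modvar cleanblockhst keynumv PySem.Dict.empty).items

-- ===== PORT B =====
def newdictfunc_alt (keynumv : Int) (keylistv : List String) (modvar : String) (cleanblockhst : List String) : List (String × Int) :=
  let newdict0 : PySem.Dict String Int :=
    (PySem.List.pyRange (keynumv - 1) (-1) (-1)).foldl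
      (fun d i =>
        match PySem.List.pyGet? keylistv i with
        | none => d  -- keylistv[i] raises IndexError in Python; excluded by Pre_
        | some k => d.insert k 0)
      PySem.Dict.empty
  let newdict :=
    cleanblockhst.foldl
      (fun d x =>
        if PySem.Str.isIn modvar x then d
        else d.keys.foldl
          -- 'newdict[k] += 1': k is always a key of d here, so modify with default 0 is exact
          (fun d' k => if PySem.Str.isIn k x then d'.modify k 0 (· + 1) else d') d)
      newdict0
  newdict.items

-- ===== PRECONDITION & SPEC =====
-- Pre_ excludes exactly the inputs where A raises IndexError (keynumv exceeds len(keylistv)).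
def Pre_newdictfunc (keynumv : Int) (keylistv : List String) (modvar : String) (cleanblockhst : List String) : Prop :=
  keynumv ≤ (keylistv.length : Int)
instance (keynumv : Int) (keylistv : List String) (modvar : String) (cleanblockhst : List String) : Decidable (Pre_newdictfunc keynumv keylistv modvar cleanblockhst) := by unfold Pre_newdictfunc; infer_instance

def pvWitness_newdictfunc : Int × List String × String × List String :=
  (2, ["ab", "b"], "mod", ["xabx", "b mod", "zbz"])

def Spec_newdictfunc (keynumv : Int) (keylistv : List String) (modvar : String) (cleanblockhst : List String) (out : List (String × Int)) : Prop := out = newdictfunc_alt keynumv keylistv modvar cleanblockhst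
instance (keynumv : Int) (keylistv : List String) (modvar : String) (cleanblockhst : List String) (out : List (String × Int)) : Decidable (Spec_newdictfunc keynumv keylistv modvar cleanblockhst out) := by unfold Spec_newdictfunc; infer_instance

-- ===== CLAIM (what is proved, stated in full; the proofs are below) =====
def Claim_equal_newdictfunc : Prop := ∀ (keynumv : Int) (keylistv : List String) (modvar : String) (cleanblockhst : List String), Dom_newdictfunc keynumv keylistv modvar cleanblockhst → Pre_newdictfunc keynumv keylistv modvar cleanblockhst → Spec_newdictfunc keynumv keylistv modvar cleanblockhst (newdictfunc keynumv keylistv modvar cleanblockhst)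

-- ===== LEMMAS AND PROOFS =====

-- range(a, -1, -1) structure
theorem pyRange_down_nil (a : Int) (h : a ≤ -1) : PySem.List.pyRange a (-1) (-1) = [] := by
  simp [PySem.List.pyRange]; omega

theorem pyRange_down_cons (a : Int) (h : 0 ≤ a) :
    PySem.List.pyRange a (-1) (-1) = a :: PySem.List.pyRange (a-1) (-1) (-1) := by
  simp only [PySem.List.pyRange]
  norm_num
  rw [if_pos (by omega : (-1:Int) < a)]
  have h1 : (a+1).toNat = a.toNat + 1 := by omega
  rw [h1, List.range_succ_eq_map]
  simp only [List.map_cons, List.map_map]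
  refine List.cons_eq_cons.mpr ⟨by simp, ?_⟩
  by_cases h0 : (0:Int) < a
  · rw [if_pos h0]; apply List.map_congr_left; intro k hk; simp [Function.comp]; ring
  · have : a = 0 := by omega
    subst this; simp

theorem pyGet?_isSome (l : List String) (i : Int) (h0 : 0 ≤ i) (h1 : i < l.length) :
    (PySem.List.pyGet? l i).isSome := by
  simp only [PySem.List.pyGet?, PySem.List.pyIdx?, if_pos h0, if_pos h1, Option.bind_some]
  simp
  omega

-- B's table-building fold skips 'none' lookups, so it is the zero insert-fold over the filterMap
theorem foldl_lookup_insert (keylistv : List String) (L : List Int) (d : PySem.Dict String Int) :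
    L.foldl (fun d i => match PySem.List.pyGet? keylistv i with | none => d | some k => d.insert k 0) d
      = (L.filterMap (PySem.List.pyGet? keylistv)).foldl (fun d k => d.insert k 0) d := by
  induction L generalizing d with
  | nil => rfl
  | cons a t ih => cases hg : PySem.List.pyGet? keylistv a <;> simp [hg, ih]

-- fold of inserts whose value depends only on the key
def insFold (g : String → Int) (K : List String) (d : PySem.Dict String Int) : PySem.Dict String Int :=
  K.foldl (fun d k => d.insert k (g k)) d

theorem keys_insFold (g : String → Int) (K : List String) (d : PySem.Dict String Int) :
    (insFold g K d).keys = PySem.Set.update d.keys K :=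
  PySem.Dict.keys_foldl_insert K (fun _ k => g k) d

theorem getD_insFold (g : String → Int) (K : List String) (d : PySem.Dict String Int) (k : String) :
    (insFold g K d).getD k 0 = if k ∈ K then g k else d.getD k 0 := by
  induction K using List.reverseRecOn generalizing d with
  | nil => simp [insFold]
  | append_singleton t a ih =>
      unfold insFold at *
      rw [List.foldl_append]
      simp only [List.foldl_cons, List.foldl_nil, PySem.Dict.getD_insert, ih]
      by_cases hka : k = a <;> by_cases hkt : k ∈ t <;> simp [hka, hkt]

-- A's while-loop is the insert-fold over the dereferenced keys, provided every index is in range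
theorem loopA_eq_insFold (keylistv : List String) (modvar : String) (cleanblockhst : List String) :
    ∀ (m : Nat) (n : Int), n.toNat ≤ m → n ≤ (keylistv.length : Int) →
    ∀ d, newdictfuncLoop keylistv modvar cleanblockhst n d
      = insFold (fun k => multimodefndr modvar k cleanblockhst)
          ((PySem.List.pyRange (n-1) (-1) (-1)).filterMap (PySem.List.pyGet? keylistv)) d := by
  intro m
  induction m with
  | zero =>
      intro n hm hlen d
      have hn : n ≤ 0 := by omega
      rw [newdictfuncLoop, if_neg (by omega), pyRange_down_nil _ (by omega)]
      rfl
  | succ m ih =>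
      intro n hm hlen d
      by_cases hn : 0 < n
      · have hsome := pyGet?_isSome keylistv (n-1) (by omega) (by omega)
        obtain ⟨k, hk⟩ := Option.isSome_iff_exists.mp hsome
        rw [newdictfuncLoop, if_pos hn, hk, pyRange_down_cons _ (by omega),
          List.filterMap_cons, hk]
        exact ih (n-1) (by omega) (by omega)
          (d.insert k (multimodefndr modvar k cleanblockhst))
      · rw [newdictfuncLoop, if_neg hn, pyRange_down_nil _ (by omega)]
        rfl

-- multimodefndr is a filtered substring count
theorem multimodefndr_eq_countP (modvar k : String) (cbh : List String) :
    multimodefndr modvar k cbh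
      = (cbh.countP (fun x => !PySem.Str.isIn modvar x && PySem.Str.isIn k x) : Int) := by
  unfold multimodefndr
  have hcg := PySem.List.foldl_congr_mem (l := cbh) (init := (0:Int))
    (f := fun modecnt x => if PySem.Str.isIn modvar x then modecnt
      else if PySem.Str.isIn k x then modecnt + 1 else modecnt)
    (g := fun acc x => if (!PySem.Str.isIn modvar x && PySem.Str.isIn k x) then acc + 1 else acc)
    (by intro acc x _
        by_cases h1 : PySem.Str.isIn modvar x <;> by_cases h2 : PySem.Str.isIn k x <;>
          simp only [PySem.Str.isIn_eq] at h1 h2 <;> simp [h1, h2])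
  rw [hcg, PySem.List.foldl_if_add_one]
  simp

-- one outer-loop step of B's counting pass preserves the key list
theorem keys_passStep (modvar : String) (x : String) (d : PySem.Dict String Int) :
    (if PySem.Str.isIn modvar x then d
     else d.keys.foldl (fun d' k => if PySem.Str.isIn k x then d'.modify k 0 (· + 1) else d') d).keys
      = d.keys := by
  by_cases hm : PySem.Str.isIn modvar x
  · rw [if_pos hm]
  · rw [if_neg hm]
    rw [PySem.List.foldl_if_eq_foldl_filter (p := fun k => PySem.Str.isIn k x)]
    rw [PySem.Dict.keys_foldl_modify _ _ (fun _ k v => v + 1)]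
    rw [PySem.Set.update_eq_append_filter]
    have hnil : (PySem.Set.ofList (d.keys.filter (fun k => PySem.Str.isIn k x))).filter
        (fun y => !PySem.Set.contains d.keys y) = [] := by
      rw [List.filter_eq_nil_iff]
      intro y hy
      have hyk : y ∈ d.keys := (List.mem_filter.mp ((PySem.Set.mem_ofList _ _).mp hy)).1
      simpa using hyk
    rw [hnil, List.append_nil]

-- one outer-loop step of B's counting pass, value at a key
theorem getD_passStep (modvar : String) (x : String) (d : PySem.Dict String Int) (k : String)
    (hnd : d.keys.Nodup) (hk : k ∈ d.keys) :
    (if PySem.Str.isIn modvar x then d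
     else d.keys.foldl (fun d' k => if PySem.Str.isIn k x then d'.modify k 0 (· + 1) else d') d).getD k 0
      = d.getD k 0 + (if !PySem.Str.isIn modvar x && PySem.Str.isIn k x then 1 else 0) := by
  by_cases hm : PySem.Str.isIn modvar x
  · rw [if_pos hm]
    have hm2 : PySem.Chars.isIn modvar.toList x.toList = true := by simpa using hm
    simp [hm2]
  · rw [if_neg hm]
    rw [PySem.List.foldl_if_eq_foldl_filter (p := fun k => PySem.Str.isIn k x)]
    rw [PySem.Dict.getD_foldl_modify_add_one]
    have hcnt : (d.keys.filter (fun k => PySem.Str.isIn k x)).count k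
        = if PySem.Str.isIn k x then 1 else 0 := by
      by_cases hkx : PySem.Str.isIn k x
      · rw [if_pos hkx]
        exact List.count_eq_one_of_mem (hnd.filter _) (List.mem_filter.mpr ⟨hk, hkx⟩)
      · rw [if_neg hkx, List.count_eq_zero_of_not_mem]
        intro hmem
        exact hkx ((List.mem_filter.mp hmem).2)
    rw [hcnt]
    have hm' : (PySem.Str.isIn modvar x) = false := by simpa using hm
    simp only [PySem.Str.isIn_eq] at hm'
    by_cases hkx : PySem.Str.isIn k x <;> simp only [PySem.Str.isIn_eq] at hkx <;>
      simp [hkx, hm']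

-- B's counting pass: keys are preserved and each key k accumulates multimodefndr's count
theorem pass_spec (modvar : String) (cbh : List String) :
    ∀ (d : PySem.Dict String Int), d.keys.Nodup →
      (cbh.foldl
        (fun d x =>
          if PySem.Str.isIn modvar x then d
          else d.keys.foldl (fun d' k => if PySem.Str.isIn k x then d'.modify k 0 (· + 1) else d') d)
        d).keys = d.keys
      ∧ ∀ k ∈ d.keys,
        (cbh.foldl
          (fun d x =>
            if PySem.Str.isIn modvar x then d
            else d.keys.foldl (fun d' k => if PySem.Str.isIn k x then d'.modify k 0 (· + 1) else d') d)
          d).getD k 0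
        = d.getD k 0 + (cbh.countP (fun x => !PySem.Str.isIn modvar x && PySem.Str.isIn k x) : Int) := by
  induction cbh with
  | nil => intro d hnd; simp
  | cons x xs ih =>
      intro d hnd
      set d' := if PySem.Str.isIn modvar x then d
        else d.keys.foldl (fun d' k => if PySem.Str.isIn k x then d'.modify k 0 (· + 1) else d') d with hd'
      have hkeys : d'.keys = d.keys := keys_passStep modvar x d
      have hnd' : d'.keys.Nodup := hkeys ▸ hnd
      obtain ⟨ihk, ihv⟩ := ih d' hnd'
      refine ⟨by simpa [hkeys] using ihk, ?_⟩
      intro k hk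
      have hk' : k ∈ d'.keys := hkeys ▸ hk
      simp only [List.foldl_cons]
      rw [ihv k hk', hd']
      rw [getD_passStep modvar x d k hnd hk]
      rw [List.countP_cons]
      by_cases hcond : (!PySem.Str.isIn modvar x && PySem.Str.isIn k x) = true <;>
        simp only [PySem.Str.isIn_eq, Bool.and_eq_true, Bool.not_eq_eq_eq_not, Bool.not_true] at hcond <;>
        simp [hcond] <;> ring

-- ===== VERDICT (by name: the statement is the Claim_ definition above) =====
theorem newdictfunc_spec : Claim_equal_newdictfunc := by
  intro keynumv keylistv modvar cleanblockhst _hdom hpre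
  simp only [Spec_newdictfunc, newdictfunc, newdictfunc_alt]
  set K := (PySem.List.pyRange (keynumv-1) (-1) (-1)).filterMap (PySem.List.pyGet? keylistv) with hK
  -- A's dict
  rw [loopA_eq_insFold keylistv modvar cleanblockhst keynumv.toNat keynumv le_rfl hpre]
  -- B's initial dict is the zero insert-fold over the same keys
  rw [foldl_lookup_insert]
  have hd0 : (K.foldl (fun d k => d.insert k 0) PySem.Dict.empty)
      = insFold (fun _ => 0) K PySem.Dict.empty := rfl
  rw [hd0]
  -- keys and nodup
  have hkeysA : (insFold (fun k => multimodefndr modvar k cleanblockhst) K PySem.Dict.empty).keys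
      = PySem.Set.ofList K := by
    rw [keys_insFold]; simp [PySem.Dict.keys_empty, PySem.Set.update_nil_left]
  have hkeys0 : (insFold (fun _ => (0:Int)) K PySem.Dict.empty).keys = PySem.Set.ofList K := by
    rw [keys_insFold]; simp [PySem.Dict.keys_empty, PySem.Set.update_nil_left]
  have hndK : (PySem.Set.ofList K).Nodup := PySem.Set.nodup_ofList K
  obtain ⟨hpkeys, hpval⟩ := pass_spec modvar cleanblockhst
    (insFold (fun _ => 0) K PySem.Dict.empty) (hkeys0 ▸ hndK)
  -- items on both sides
  rw [PySem.Dict.items_eq_map_keys _ (hkeysA ▸ hndK) 0,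
      PySem.Dict.items_eq_map_keys _ ((hpkeys.trans hkeys0) ▸ hndK) 0]
  rw [hkeysA, hpkeys, hkeys0]
  apply List.map_congr_left
  intro k hkmem
  have hkK : k ∈ K := (PySem.Set.mem_ofList _ _).mp hkmem
  rw [getD_insFold, if_pos hkK]
  rw [hpval k (by rw [hkeys0]; exact hkmem)]
  rw [getD_insFold, if_pos hkK]
  rw [multimodefndr_eq_countP]
  simp
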